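-- pv_equiv track=rewrite | github.com/TomPerrytree/Old_Exercises | ex2.py | exercicio
-- ===== SOURCE A (Python) =====
-- def fibonacci(tamanho):
--     resp = None
--     try:
--         resp = []
--
--         if (type(tamanho) == int) == False:
--             raise Exception("Valor passado não é um número!")
--         while len(resp) < tamanho:
--             if len(resp) < 2:
--                 resp.append(1)
--             else:
--                 last_index = len(resp)-1
--                 previous_index = last_index-1
--                 current_num = resp[last_index] + resp[previous_index]
--                 resp.append(current_num)
--     except Exception as error:
--         resp = error
--     return resp
--
-- def exercicio(num):
--     resp = None
--     try:
--         if type(num) != int: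
--             raise Exception("Valor passado não é um número")
--         sequence = fibonacci(100) #Criando uma sequência grande o suficiente
--         for i in range(len(sequence)):
--             if num == sequence[i]:
--                 resp = f"O valor {num} está na sequência de Fibonnaci, sendo ele o {i+1}º número!"
--                 break
--             resp = f"O valor {num} não pertence à sequência de Fibonnaci"
--     except Exception as error:
--         resp = error
--     return resp
-- ===== SOURCE B (Python) =====
-- def exercicio(num):
--     try:
--         if type(num) != int:
--             raise Exception("Valor passado não é um número")
--         resp = f"O valor {num} não pertence à sequência de Fibonnaci"
--         prev, cur = 1, 1
--         for pos in range(1, 101):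
--             if prev == num:
--                 resp = f"O valor {num} está na sequência de Fibonnaci, sendo ele o {pos}º número!"
--                 break
--             prev, cur = cur, prev + cur
--         return resp
--     except Exception as error:
--         return error
-- ===== Notes on version B (the rewrite author's own statement) =====
-- stated objective: simpler
-- what changed: Generates Fibonacci numbers on the fly with two running variables and a position counter, capped at the same fixed number of terms as A, instead of precomputing a list and scanning it by index.
import Mathlib
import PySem

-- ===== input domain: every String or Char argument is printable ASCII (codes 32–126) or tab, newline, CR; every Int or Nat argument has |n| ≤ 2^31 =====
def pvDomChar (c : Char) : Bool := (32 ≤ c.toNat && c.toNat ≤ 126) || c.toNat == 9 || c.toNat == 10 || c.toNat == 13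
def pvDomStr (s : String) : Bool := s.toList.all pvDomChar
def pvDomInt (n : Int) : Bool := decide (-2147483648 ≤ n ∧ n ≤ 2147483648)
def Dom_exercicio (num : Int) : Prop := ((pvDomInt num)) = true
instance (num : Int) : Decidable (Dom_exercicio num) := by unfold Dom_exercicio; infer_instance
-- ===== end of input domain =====

-- B replaces A's precomputed 100-element list plus indexed scan by on-the-fly generation
-- with two running variables and a position counter (same 100-term cap): simpler, O(1) space.
-- The type(num) checks / exception paths of both Pythons are unreachable for an int argument,
-- so the ports are the int-path computation; both Pythons return a String on every int.

-- ===== PORT A =====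
-- fibonacci(tamanho)'s while loop: one append per iteration, so `tamanho` steps of fuel.
-- resp[last]/resp[prev] are always in range; getD 0 is only a totality default (unreachable).
def fibStepA (resp : List Int) : List Int :=
  if resp.length < 2 then resp ++ [1]
  else resp ++ [resp.getD (resp.length - 1) 0 + resp.getD (resp.length - 2) 0]

def fibLoopA : Nat → Nat → List Int → List Int
  | 0, _, resp => resp
  | fuel + 1, tamanho, resp =>
      if resp.length < tamanho then fibLoopA fuel tamanho (fibStepA resp) else resp

def fibonacciA (tamanho : Nat) : List Int := fibLoopA tamanho tamanho []

def msgFound (num pos : Int) : String :=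
  "O valor " ++ PySem.Int.toStr num ++ " está na sequência de Fibonnaci, sendo ele o "
    ++ PySem.Int.toStr pos ++ "º número!"

def msgNo (num : Int) : String :=
  "O valor " ++ PySem.Int.toStr num ++ " não pertence à sequência de Fibonnaci"

-- the `for i in range(len(sequence))` loop with break; resp : Option String (starts None)
def scanLoopA (num : Int) (seq : List Int) : List Nat → Option String → Option String
  | [], resp => resp
  | i :: rest, _ =>
      if num == seq.getD i 0 then some (msgFound num ((i : Int) + 1))
      else scanLoopA num seq rest (some (msgNo num))

def exercicio (num : Int) : String :=
  let sequence := fibonacciA 100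
  -- resp is None only if the loop never runs (impossible: the sequence has 100 elements);
  -- getD "" is the totality default for that unreachable case
  (scanLoopA num sequence (List.range sequence.length) none).getD ""

-- ===== PORT B =====
-- generate on the fly: prev, cur running values, pos counter, 100 iterations, break on hit
def genLoopB (num : Int) : Nat → Int → Int → Int → Option String
  | 0, _, _, _ => none
  | rem + 1, prev, cur, pos =>
      if prev == num then some (msgFound num pos)
      else genLoopB num rem cur (prev + cur) (pos + 1)

def exercicio_alt (num : Int) : String :=
  match genLoopB num 100 1 1 1 with
  | some s => s
  | none => msgNo num

-- ===== PRECONDITION & SPEC =====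
def Spec_exercicio (num : Int) (out : String) : Prop := out = exercicio_alt num
instance (num : Int) (out : String) : Decidable (Spec_exercicio num out) := by unfold Spec_exercicio; infer_instance

-- ===== CLAIM (what is proved, stated in full; the proofs are below) =====
def Claim_equal_exercicio : Prop := ∀ (num : Int), Dom_exercicio num → Spec_exercicio num (exercicio num)

-- ===== LEMMAS AND PROOFS =====

set_option maxRecDepth 4000

-- the mathematical front-built Fibonacci stream both loops walk
def gen : Int → Int → Nat → List Int
  | _, _, 0 => []
  | a, b, n + 1 => a :: gen b (a + b) n

theorem gen_length (a b : Int) (n : Nat) : (gen a b n).length = n := by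
  induction n generalizing a b with
  | zero => rfl
  | succ n ih => simp [gen, ih]

-- A's list of 100 terms is the generated stream (closed computation)
theorem fibonacciA_eq : fibonacciA 100 = gen 1 1 100 := by decide

theorem int_beq_comm (a b : Int) : (a == b) = (b == a) := by
  by_cases h : a = b
  · subst h; rfl
  · have h2 : b ≠ a := fun hh => h hh.symm
    simp [h, h2]

theorem findIdx?_flip (num : Int) (l : List Int) :
    l.findIdx? (num == ·) = l.findIdx? (· == num) := by
  have : (fun x => num == x) = (fun x => x == num) := by
    funext x; exact int_beq_comm num x
  rw [this]

-- B's loop = findIdx? over the stream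
theorem genLoopB_eq (num : Int) (n : Nat) :
    ∀ (a b : Int) (pos : Int),
      genLoopB num n a b pos =
        match (gen a b n).findIdx? (· == num) with
        | some i => some (msgFound num (pos + i))
        | none => none := by
  induction n with
  | zero => intro a b pos; rfl
  | succ n ih =>
    intro a b pos
    by_cases h : (a == num) = true
    · simp [genLoopB, gen, List.findIdx?_cons, h]
    · have h' : (a == num) = false := by simpa using h
      simp only [genLoopB, gen, List.findIdx?_cons, h', Bool.false_eq_true, if_false]
      rw [ih b (a + b) (pos + 1)]
      cases hf : (gen b (a + b) n).findIdx? (· == num) with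
      | none => rfl
      | some i =>
        show some (msgFound num (pos + 1 + (i : Int))) = some (msgFound num (pos + ((i + 1 : Nat) : Int)))
        have harith : pos + 1 + (i : Int) = pos + ((i + 1 : Nat) : Int) := by push_cast; ring
        rw [harith]

-- A's scan loop = findIdx? over the suffix of seq it still has to visit
theorem scanLoopA_eq (num : Int) (seq : List Int) :
    ∀ (suf pre : List Int) (resp : Option String),
      seq = pre ++ suf →
      scanLoopA num seq (List.range' pre.length suf.length) resp =
        match suf.findIdx? (num == ·) with
        | some i => some (msgFound num ((pre.length + i + 1 : Nat) : Int))
        | none => if suf.isEmpty then resp else some (msgNo num) := by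
  intro suf
  induction suf with
  | nil => intro pre resp h; rfl
  | cons x rest ih =>
    intro pre resp h
    have hget : seq.getD pre.length 0 = x := by
      subst h
      rw [List.getD_eq_getElem?_getD, List.getElem?_append_right (Nat.le_refl _)]
      simp
    by_cases hx : (num == x) = true
    · simp only [List.length_cons, List.range'_succ, scanLoopA, hget, hx, List.findIdx?_cons, if_true]
      show some (msgFound num ((pre.length : Int) + 1)) = some (msgFound num ((pre.length + 0 + 1 : Nat) : Int))
      have harith : ((pre.length : Int) + 1) = ((pre.length + 0 + 1 : Nat) : Int) := by push_cast; ring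
      rw [harith]
    · have hx' : (num == x) = false := by simpa using hx
      simp only [List.length_cons, List.range'_succ, scanLoopA, hget, hx',
        List.findIdx?_cons, Bool.false_eq_true, if_false]
      have hpre : (pre ++ [x]).length = pre.length + 1 := by simp
      have hrec := ih (pre ++ [x]) (some (msgNo num)) (by simp [h])
      rw [hpre] at hrec
      rw [hrec]
      cases hf : rest.findIdx? (num == ·) with
      | none => cases rest <;> simp
      | some i =>
        show some (msgFound num ((pre.length + 1 + i + 1 : Nat) : Int)) = some (msgFound num ((pre.length + (i + 1) + 1 : Nat) : Int))
        have harith : pre.length + 1 + i + 1 = pre.length + (i + 1) + 1 := by omega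
        rw [harith]

-- ===== VERDICT (by name: the statement is the Claim_ definition above) =====
theorem exercicio_spec : Claim_equal_exercicio := by
  intro num _
  unfold Spec_exercicio exercicio exercicio_alt
  have hlen : (fibonacciA 100).length = 100 := by rw [fibonacciA_eq, gen_length]
  have hrange : List.range (fibonacciA 100).length = List.range' 0 (gen 1 1 100).length := by
    rw [hlen, gen_length, List.range_eq_range']
  have hA := scanLoopA_eq num (fibonacciA 100) (gen 1 1 100) [] none (by simpa using fibonacciA_eq)
  simp only [List.length_nil] at hA
  have hB := genLoopB_eq num 100 1 1 1
  simp only [hrange, hA, hB, findIdx?_flip]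
  cases hf : (gen 1 1 100).findIdx? (· == num) with
  | none =>
    have hne : (gen 1 1 100).isEmpty = false := by
      have hl := gen_length 1 1 100
      cases hg : gen 1 1 100 with
      | nil => rw [hg] at hl; simp at hl
      | cons y ys => rfl
    simp [hne]
  | some i =>
    show msgFound num ((0 + i + 1 : Nat) : Int) = msgFound num (1 + (i : Int))
    have harith : ((0 + i + 1 : Nat) : Int) = 1 + (i : Int) := by push_cast; ring
    rw [harith]
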